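-- pv_equiv track=rewrite | github.com/opendevopsautomation/python | leetcode/Maximum-Score-From-Removing-Substrings.py | stringRemove
-- ===== SOURCE A (Python) =====
-- def stringRemove(s: str, pattern: str, xy: int) -> (str, int):
--     """
--     Removes all occurrences of the given 2-character pattern from the string `s`.
--     Returns the updated string and the total points earned (xy for each removal).
--     """
--     if len(s) < 2:
--         return s, 0  # No possible pattern to remove
--
--     stack = []
--     count = 0
--
--     for ch in s:
--         # Check if the top of the stack + current character matches the pattern
--         if stack and ch == pattern[1] and stack[-1] == pattern[0]:
--             stack.pop()       # Remove the matched pair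
--             count += xy       # Add points for this pattern
--         else:
--             stack.append(ch)  # Otherwise, keep building the string
--
--     s = ''.join(stack)  # Build the updated string from stack
--     return s, count      # Return new string and score from this pass
-- ===== SOURCE B (Python) =====
-- def stringRemove(s: str, pattern: str, xy: int) -> (str, int):
--     if len(s) < 2:
--         return s, 0
--     a, b = pattern[0], pattern[1]
--     new = s
--     while True:
--         out = []
--         i = 0
--         changed = False
--         while i < len(new):
--             if i + 1 < len(new) and new[i] == a and new[i + 1] == b:
--                 i += 2
--                 changed = True
--             else:
--                 out.append(new[i])
--                 i += 1
--         new = ''.join(out)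
--         if not changed:
--             break
--     return new, (len(s) - len(new)) // 2 * xy
-- ===== Notes on version B (the rewrite author's own statement) =====
-- stated objective: alternative
-- what changed: Replaced A's single-pass stack matcher with repeated left-to-right remove-adjacent-pairs scans iterated to a fixpoint, with the score recovered in closed form as (len(s)-len(result))//2*xy instead of being accumulated per removal.
import Mathlib
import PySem

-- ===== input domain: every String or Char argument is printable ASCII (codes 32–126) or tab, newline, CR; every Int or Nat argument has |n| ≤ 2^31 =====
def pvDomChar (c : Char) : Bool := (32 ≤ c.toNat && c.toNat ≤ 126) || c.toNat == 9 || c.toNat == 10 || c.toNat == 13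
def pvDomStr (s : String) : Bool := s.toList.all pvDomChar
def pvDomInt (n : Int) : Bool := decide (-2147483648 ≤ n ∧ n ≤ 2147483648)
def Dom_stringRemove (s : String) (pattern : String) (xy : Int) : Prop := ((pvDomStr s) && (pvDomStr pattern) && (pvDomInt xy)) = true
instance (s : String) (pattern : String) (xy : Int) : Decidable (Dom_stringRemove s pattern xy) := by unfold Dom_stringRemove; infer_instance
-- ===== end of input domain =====

-- B replaces A's one-pass stack with repeated remove-adjacent-occurrences scans to a
-- fixpoint, recovering the score in closed form from the length difference (alternative
-- decomposition, not claimed faster).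

-- ===== PORT A =====
-- A's for-loop: state = (stack with head = top, count); ''.join(stack) reverses at the end
def procA (a b : Char) (xy : Int) : List Char → Int → List Char → List Char × Int
  | st, c, [] => (st, c)
  | h :: st', c, ch :: t =>
      if ch = b ∧ h = a then procA a b xy st' (c + xy) t
      else procA a b xy (ch :: h :: st') c t
  | [], c, ch :: t => procA a b xy [ch] c t

def stringRemove (s : String) (pattern : String) (xy : Int) : String × Int :=
  if PySem.Str.len s < 2 then (s, 0)
  else
    match pattern.toList with
    | p0 :: p1 :: _ =>
        let r := procA p0 p1 xy [] 0 s.toList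
        (String.ofList r.1.reverse, r.2)
    | _ => (s, 0)  -- unreachable under Pre_: the Python A raises IndexError (pattern[1]) here

-- ===== PORT B =====
-- one scan of Source B's inner while loop: drop the leftmost non-overlapping [a,b] pairs,
-- returning the kept characters and the `changed` flag
def repPass (a b : Char) : List Char → List Char × Bool
  | [] => ([], false)
  | [x] => ([x], false)
  | x :: y :: t =>
      if x = a ∧ y = b then ((repPass a b t).1, true)
      else ((x :: (repPass a b (y :: t)).1), (repPass a b (y :: t)).2)

-- termination measure for the outer while loop: a changed pass shortens the string
theorem repPass_len_le (a b : Char) : ∀ l : List Char, (repPass a b l).1.length ≤ l.length := by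
  intro l
  induction l using repPass.induct a b with
  | case1 => simp [repPass]
  | case2 => simp [repPass]
  | case3 x y t h ih =>
      have hrw : repPass a b (x :: y :: t) = ((repPass a b t).1, true) := by
        simp [repPass, h.1, h.2]
      rw [hrw]
      simp
      omega
  | case4 x y t h ih =>
      simp only [repPass, if_neg h]
      simp at ih ⊢
      omega

theorem repPass_len_lt (a b : Char) : ∀ l : List Char, (repPass a b l).2 = true → (repPass a b l).1.length < l.length := by
  intro l
  induction l using repPass.induct a b with
  | case1 => simp [repPass]
  | case2 => simp [repPass]
  | case3 x y t h ih =>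
      intro _
      have hrw : repPass a b (x :: y :: t) = ((repPass a b t).1, true) := by
        simp [repPass, h.1, h.2]
      rw [hrw]
      have := repPass_len_le a b t
      simp at this ⊢
      omega
  | case4 x y t h ih =>
      intro hc
      simp only [repPass, if_neg h] at hc ⊢
      have := ih hc
      simp at this ⊢
      omega

-- Source B's outer `while True` loop
def bLoop (a b : Char) (l : List Char) : List Char :=
  let r := repPass a b l
  if h : r.2 = true then bLoop a b r.1 else r.1
termination_by l.length
decreasing_by exact repPass_len_lt a b l h

def stringRemove_alt (s : String) (pattern : String) (xy : Int) : String × Int :=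
  if PySem.Str.len s < 2 then (s, 0)
  else
    match pattern.toList with
    | p0 :: tl =>
        match tl with
        | p1 :: _ =>
            let newl := bLoop p0 p1 s.toList
            (String.ofList newl, PySem.Int.floordiv (PySem.Str.len s - (newl.length : Int)) 2 * xy)
        | [] => (s, 0)  -- unreachable under Pre_: Source B raises IndexError (pattern[1]) here
    | [] => (s, 0)  -- unreachable under Pre_: Source B raises IndexError (pattern[0]) here

-- ===== PRECONDITION & SPEC =====
-- Pre_ excludes exactly the inputs where A raises IndexError (len(s) ≥ 2 with a pattern
-- shorter than 2 characters); B raises there too.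
def Pre_stringRemove (s : String) (pattern : String) (xy : Int) : Prop :=
  PySem.Str.len s < 2 ∨ 2 ≤ PySem.Str.len pattern

instance (s : String) (pattern : String) (xy : Int) : Decidable (Pre_stringRemove s pattern xy) := by
  unfold Pre_stringRemove; infer_instance

def pvWitness_stringRemove : String × String × Int := ("cabbabc", "ab", 5)

def Spec_stringRemove (s : String) (pattern : String) (xy : Int) (out : String × Int) : Prop := out = stringRemove_alt s pattern xy
instance (s : String) (pattern : String) (xy : Int) (out : String × Int) : Decidable (Spec_stringRemove s pattern xy out) := by unfold Spec_stringRemove; infer_instance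

-- ===== CLAIM (what is proved, stated in full; the proofs are below) =====
def Claim_equal_stringRemove : Prop := ∀ (s : String) (pattern : String) (xy : Int), Dom_stringRemove s pattern xy → Pre_stringRemove s pattern xy → Spec_stringRemove s pattern xy (stringRemove s pattern xy)

-- ===== LEMMAS AND PROOFS =====

-- the stack part of A's loop, count dropped (proof-side abstraction of procA)
def proc (a b : Char) : List Char → List Char → List Char
  | st, [] => st
  | h :: st', ch :: t =>
      if ch = b ∧ h = a then proc a b st' t
      else proc a b (ch :: h :: st') t
  | [], ch :: t => proc a b [ch] t

-- invariant: the stack never contains an adjacent pair (b, a) with head = top of stack,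
-- i.e. the built prefix never contains the two pattern characters adjacently
def StInv (a b : Char) : List Char → Prop
  | x :: y :: t => ¬(x = b ∧ y = a) ∧ StInv a b (y :: t)
  | _ => True

theorem StInv_tail (a b : Char) (h : Char) (st : List Char) (hi : StInv a b (h :: st)) : StInv a b st := by
  cases st with
  | nil => trivial
  | cons h2 t => exact hi.2

-- procA = (proc, xy * number of pops), and each pop removes two characters overall
theorem procA_spec (a b : Char) (xy : Int) :
    ∀ (l st : List Char) (c : Int), ∃ p : ℕ,
      procA a b xy st c l = (proc a b st l, c + xy * p) ∧
      (proc a b st l).length + 2 * p = st.length + l.length := by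
  intro l
  induction l with
  | nil =>
      intro st c
      exact ⟨0, by simp [procA, proc], by simp [proc]⟩
  | cons ch t ih =>
      intro st c
      cases st with
      | nil =>
          obtain ⟨p, h1, h2⟩ := ih [ch] c
          refine ⟨p, by simpa [procA, proc] using h1, ?_⟩
          simp only [proc]
          simp at h2 ⊢
          omega
      | cons h st' =>
          by_cases hc : ch = b ∧ h = a
          · obtain ⟨p, h1, h2⟩ := ih st' (c + xy)
            refine ⟨p + 1, ?_, ?_⟩
            · simp only [procA, proc, if_pos hc, h1, Prod.mk.injEq]
              exact ⟨trivial, by push_cast; ring⟩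
            · simp only [proc, if_pos hc]
              simp at h2 ⊢
              omega
          · obtain ⟨p, h1, h2⟩ := ih (ch :: h :: st') c
            refine ⟨p, ?_, ?_⟩
            · simp only [procA, proc, if_neg hc, h1]
            · simp only [proc, if_neg hc]
              simp at h2 ⊢
              omega

-- the key confluence step: removing one adjacent occurrence at the front of the
-- remaining input does not change the final stack (given the stack invariant)
theorem proc_ab (a b : Char) (t : List Char) :
    ∀ st : List Char, StInv a b st → proc a b st (a :: b :: t) = proc a b st t := by
  intro st hst
  cases st with
  | nil => simp [proc]
  | cons h st' =>
      by_cases hc : a = b ∧ h = a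
      · obtain ⟨hab, hha⟩ := hc
        cases st' with
        | nil => simp [proc, hab, hha]
        | cons h2 t2 =>
            have hba : ¬(h = b ∧ h2 = a) := hst.1
            have h2a : ¬(h2 = a) := fun he => hba ⟨by rw [hha, hab], he⟩
            subst hha; subst hab
            simp [proc, h2a]
      · simp [proc, hc]

-- one pass of Source B's scan does not change the final stack
theorem proc_rep (a b : Char) :
    ∀ l st : List Char, StInv a b st → proc a b st (repPass a b l).1 = proc a b st l := by
  intro l
  induction l using repPass.induct a b with
  | case1 => intro st _; simp [repPass]
  | case2 x => intro st _; simp [repPass]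
  | case3 x y t hm ih =>
      intro st hst
      rw [hm.1, hm.2]
      have hrw : repPass a b (a :: b :: t) = ((repPass a b t).1, true) := by
        simp [repPass]
      rw [hrw]
      exact (ih st hst).trans (proc_ab a b t st hst).symm
  | case4 x y t hm ih =>
      intro st hst
      simp only [repPass, if_neg hm]
      cases st with
      | nil =>
          show proc a b [] (x :: (repPass a b (y :: t)).1) = proc a b [] (x :: y :: t)
          simp only [proc]
          exact ih [x] trivial
      | cons h st' =>
          by_cases hc : x = b ∧ h = a
          · simp only [proc, if_pos hc]
            exact ih st' (StInv_tail a b h st' hst)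
          · simp only [proc, if_neg hc]
            exact ih (x :: h :: st') ⟨hc, hst⟩

-- boundary condition: top of stack followed by next input char is not the pattern
def Bnd (a b : Char) : List Char → List Char → Prop
  | h :: _, ch :: _ => ¬(ch = b ∧ h = a)
  | _, _ => True

-- at the fixpoint (no occurrence left) the stack simply accumulates the input
theorem proc_nochange (a b : Char) :
    ∀ l st : List Char, (repPass a b l).2 = false → Bnd a b st l →
      proc a b st l = l.reverse ++ st := by
  intro l
  induction l using repPass.induct a b with
  | case1 => intro st _ _; simp [proc]
  | case2 x =>
      intro st _ hb
      cases st with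
      | nil => simp [proc]
      | cons h st' =>
          simp only [Bnd] at hb
          simp [proc, if_neg hb]
  | case3 x y t hm ih =>
      intro st hch _
      simp [repPass, hm.1, hm.2] at hch
  | case4 x y t hm ih =>
      intro st hch hb
      have hch' : (repPass a b (y :: t)).2 = false := by
        simpa [repPass, if_neg hm] using hch
      have hm' : ¬(y = b ∧ x = a) := fun hy => hm ⟨hy.2, hy.1⟩
      cases st with
      | nil =>
          have hih := ih [x] hch' hm'
          simp only [proc, if_neg hm'] at hih ⊢
          rw [hih]
          simp
      | cons h st' =>
          simp only [Bnd] at hb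
          have hih := ih (x :: h :: st') hch' hm'
          simp only [proc, if_neg hb, if_neg hm'] at hih ⊢
          rw [hih]
          simp

theorem rep_unchanged (a b : Char) :
    ∀ l : List Char, (repPass a b l).2 = false → (repPass a b l).1 = l := by
  intro l
  induction l using repPass.induct a b with
  | case1 => simp [repPass]
  | case2 x => simp [repPass]
  | case3 x y t hm ih =>
      intro hch
      simp [repPass, hm.1, hm.2] at hch
  | case4 x y t hm ih =>
      intro hch
      have hch' : (repPass a b (y :: t)).2 = false := by
        simpa [repPass, if_neg hm] using hch
      simp [repPass, if_neg hm, ih hch']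

-- B's loop computes exactly A's final stack (reversed into string order)
theorem bLoop_proc_aux (a b : Char) :
    ∀ (n : ℕ) (l : List Char), l.length ≤ n → bLoop a b l = (proc a b [] l).reverse := by
  intro n
  induction n with
  | zero =>
      intro l hl
      have : l = [] := by
        cases l with
        | nil => rfl
        | cons x t => simp at hl
      subst this
      rw [bLoop]
      simp [repPass, proc]
  | succ n ih =>
      intro l hl
      rw [bLoop]
      by_cases hch : (repPass a b l).2 = true
      · simp only [dif_pos hch]
        have hlt := repPass_len_lt a b l hch
        rw [ih _ (by omega), proc_rep a b l [] trivial]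
      · simp only [dif_neg hch]
        have hch' : (repPass a b l).2 = false := by simpa using hch
        rw [rep_unchanged a b l hch', proc_nochange a b l [] hch' trivial]
        simp

theorem bLoop_proc (a b : Char) (l : List Char) : bLoop a b l = (proc a b [] l).reverse :=
  bLoop_proc_aux a b l.length l le_rfl

-- ===== VERDICT (by name: the statement is the Claim_ definition above) =====
theorem stringRemove_spec : Claim_equal_stringRemove := by
  unfold Claim_equal_stringRemove
  intro s pattern xy _hdom _hpre
  unfold Spec_stringRemove stringRemove stringRemove_alt
  by_cases hs : PySem.Str.len s < 2
  · rw [if_pos hs, if_pos hs]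
  · rw [if_neg hs, if_neg hs]
    rcases hpl : pattern.toList with _ | ⟨p0, _ | ⟨p1, rest⟩⟩
    · rfl
    · rfl
    · obtain ⟨p, h1, h2⟩ := procA_spec p0 p1 xy s.toList [] 0
      have hb := bLoop_proc p0 p1 s.toList
      simp only [h1, hb, Prod.mk.injEq]
      refine ⟨trivial, ?_⟩
      rw [List.length_reverse, PySem.Str.len_eq]
      rw [show ((s.toList.length : Int)) = ((s.length : Int)) by simp]
      have hlen : ((s.length : Int)) - ((proc p0 p1 [] s.toList).length : Int) = 2 * p := by
        simp at h2
        omega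
      rw [hlen]
      have hfd : PySem.Int.floordiv (2 * (p : Int)) 2 = (p : Int) := by
        rw [PySem.Int.floordiv_eq_ediv_of_pos (by norm_num)]
        omega
      rw [hfd]
      ring
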